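-- pv_equiv track=rewrite | github.com/ram-elgov/cs1001py | hw/hw4/hw4_206867517.py | can_create_twice_rec
-- ===== SOURCE A (Python) =====
-- def can_create_twice_rec(s, L, left):
--     if left > len(L) - 1 and s == 0:  # O(1)
--         return True
--     elif left > len(L) - 1 and s != 0:  # O(1)
--         return False
--     return can_create_twice_rec(s, L, left + 1) or can_create_twice_rec(s + L[left], L, left + 1) \
--            or can_create_twice_rec(s + 2 * L[left], L, left + 1) or can_create_twice_rec(s - L[left], L, left + 1) \
--            or can_create_twice_rec(s - 2 * L[left], L, left + 1)  # O(1)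
-- ===== SOURCE B (Python) =====
-- def can_create_twice_rec(s, L, left):
--     reachable = {s}
--     i = left
--     while i <= len(L) - 1:
--         x = L[i]
--         reachable = {r + c * x for r in reachable for c in (0, 1, 2, -1, -2)}
--         i += 1
--     return 0 in reachable
-- ===== Notes on version B (the rewrite author's own statement) =====
-- stated objective: alternative
-- what changed: Replaced the 5-way exponential recursion by one iterative pass maintaining the set of reachable partial sums (DP), collapsing repeated partial sums.
-- outside the precondition, e.g. on can_create_twice_rec(0, [1], -5): A returns True, B raises IndexError
import Mathlib
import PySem

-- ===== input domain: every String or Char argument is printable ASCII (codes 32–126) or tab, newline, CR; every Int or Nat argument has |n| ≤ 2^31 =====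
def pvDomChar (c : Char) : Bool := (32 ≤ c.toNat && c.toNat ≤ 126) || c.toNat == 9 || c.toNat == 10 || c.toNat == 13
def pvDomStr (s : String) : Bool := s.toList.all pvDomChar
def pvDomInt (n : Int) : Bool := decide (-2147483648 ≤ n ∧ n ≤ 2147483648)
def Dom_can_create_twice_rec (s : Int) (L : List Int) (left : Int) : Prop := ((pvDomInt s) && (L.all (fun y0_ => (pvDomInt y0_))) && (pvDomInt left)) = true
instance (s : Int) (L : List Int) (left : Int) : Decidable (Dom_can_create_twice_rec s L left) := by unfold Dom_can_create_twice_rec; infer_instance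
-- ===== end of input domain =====

-- B replaces the 5-way recursion by an iterative DP over the set of reachable partial sums (an alternative algorithm; a timing run could not confirm a speed difference).

-- ===== PORT A =====
def can_create_twice_rec (s : Int) (L : List Int) (left : Int) : Bool :=
  if left > (L.length : Int) - 1 && s == 0 then true
  else if left > (L.length : Int) - 1 && s != 0 then false
  else
    match PySem.List.pyGet? L left with
    | none => false   -- Python raises IndexError here; excluded by Pre_
    | some x =>
      can_create_twice_rec s L (left + 1) || can_create_twice_rec (s + x) L (left + 1)
        || can_create_twice_rec (s + 2 * x) L (left + 1) || can_create_twice_rec (s - x) L (left + 1)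
        || can_create_twice_rec (s - 2 * x) L (left + 1)
termination_by ((L.length : Int) - left).toNat
decreasing_by
  all_goals
    simp only [Bool.and_eq_true, decide_eq_true_eq, bne_iff_ne, not_and, beq_iff_eq] at *
    omega

-- ===== PORT B =====
def pvAltLoop (L : List Int) (i : Int) (reach : PySem.Set Int) : Bool :=
  if i ≤ (L.length : Int) - 1 then
    match PySem.List.pyGet? L i with
    | none => false   -- Python raises IndexError here; excluded by Pre_
    | some x =>
      pvAltLoop L (i + 1)
        (PySem.Set.ofList (reach.flatMap (fun r => [0, 1, 2, -1, -2].map (fun c => r + c * x))))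
  else reach.contains 0
termination_by ((L.length : Int) - i).toNat
decreasing_by omega

def can_create_twice_rec_alt (s : Int) (L : List Int) (left : Int) : Bool :=
  pvAltLoop L left (PySem.Set.ofList [s])

-- ===== PRECONDITION & SPEC =====
-- Pre_ excludes left < -len(L): there Python A indexes L out of range — it raises IndexError
-- except when a short-circuited recursive branch already returned True before touching the bad
-- index — while B's loop always raises IndexError there.
def Pre_can_create_twice_rec (s : Int) (L : List Int) (left : Int) : Prop :=
  -(L.length : Int) ≤ left
instance (s : Int) (L : List Int) (left : Int) : Decidable (Pre_can_create_twice_rec s L left) := by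
  unfold Pre_can_create_twice_rec; infer_instance

def pvWitness_can_create_twice_rec : Int × List Int × Int := (3, [1, 2], 0)

def Spec_can_create_twice_rec (s : Int) (L : List Int) (left : Int) (out : Bool) : Prop := out = can_create_twice_rec_alt s L left
instance (s : Int) (L : List Int) (left : Int) (out : Bool) : Decidable (Spec_can_create_twice_rec s L left out) := by unfold Spec_can_create_twice_rec; infer_instance

-- ===== CLAIM (what is proved, stated in full; the proofs are below) =====
def Claim_equal_can_create_twice_rec : Prop := ∀ (s : Int) (L : List Int) (left : Int), Dom_can_create_twice_rec s L left → Pre_can_create_twice_rec s L left → Spec_can_create_twice_rec s L left (can_create_twice_rec s L left)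

-- ===== LEMMAS AND PROOFS =====

-- any over a Python set built from a list = any over the list (dedup cannot change any)
theorem pv_any_ofList (l : List Int) (f : Int → Bool) :
    (PySem.Set.ofList l).any f = l.any f := by
  rw [Bool.eq_iff_iff]
  simp only [List.any_eq_true]
  constructor
  · rintro ⟨x, hx, hf⟩; exact ⟨x, (PySem.Set.mem_ofList l x).1 hx, hf⟩
  · rintro ⟨x, hx, hf⟩; exact ⟨x, (PySem.Set.mem_ofList l x).2 hx, hf⟩

-- unfolding A at the base (left past the end)
theorem pvA_base (s : Int) (L : List Int) (left : Int) (h : left > (L.length : Int) - 1) :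
    can_create_twice_rec s L left = (s == 0) := by
  rw [can_create_twice_rec]
  by_cases hs : s = 0 <;> simp [h, hs]

-- loop invariant: the DP loop computes "some reachable partial sum succeeds under A"
theorem pv_loop_inv (L : List Int) :
    ∀ (n : Nat) (i : Int) (reach : PySem.Set Int),
      -(L.length : Int) ≤ i → n = ((L.length : Int) - i).toNat →
      pvAltLoop L i reach = reach.any (fun r => can_create_twice_rec r L i) := by
  intro n
  induction n with
  | zero =>
    intro i reach hlo hn
    have hi : i > (L.length : Int) - 1 := by omega
    rw [pvAltLoop]
    simp only [if_neg (by omega : ¬ i ≤ (L.length : Int) - 1)]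
    rw [Bool.eq_iff_iff]
    simp only [List.any_eq_true, pvA_base _ _ _ hi, beq_iff_eq]
    constructor
    · intro h
      exact ⟨0, by simpa using h, rfl⟩
    · rintro ⟨x, hx, rfl⟩
      simpa using hx
  | succ n ih =>
    intro i reach hlo hn
    have hle : i ≤ (L.length : Int) - 1 := by omega
    obtain ⟨x, hx⟩ : ∃ x, PySem.List.pyGet? L i = some x := by
      rcases h : PySem.List.pyGet? L i with _ | x
      · rw [PySem.List.pyGet?_eq_none_iff] at h
        exact absurd (by constructor <;> omega : PySem.Raise.InRange L.length i) h
      · exact ⟨x, rfl⟩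
    rw [pvAltLoop]
    simp only [if_pos hle, hx]
    rw [ih (i + 1) _ (by omega) (by omega), pv_any_ofList, List.any_flatMap]
    apply List.any_congr rfl
    intro r
    rw [can_create_twice_rec]
    have h1 : ¬ (i > (L.length : Int) - 1 && r == 0) = true := by
      simp; omega
    have h2 : ¬ (i > (L.length : Int) - 1 && r != 0) = true := by
      simp; omega
    simp only [if_neg h1, if_neg h2, hx, List.any_map, List.any_cons, List.any_nil,
      Function.comp]
    ring_nf
    simp [Bool.or_assoc]

-- ===== VERDICT (by name: the statement is the Claim_ definition above) =====
theorem can_create_twice_rec_spec : Claim_equal_can_create_twice_rec := by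
  intro s L left _ hpre
  unfold Spec_can_create_twice_rec can_create_twice_rec_alt
  rw [pv_loop_inv L ((L.length : Int) - left).toNat left _ hpre rfl, pv_any_ofList]
  simp
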